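-- pv_equiv track=rewrite | github.com/rcharan/nyc-ds-100719-lectures | week-1/rolling-stones-lab/functions.py | _get_highest_freq
-- ===== SOURCE A (Python) =====
-- def _get_highest_freq(elts):
--     count_dict = {}
--     for elt in elts:
--         if elt in count_dict:
--             count_dict[elt] += 1
--         else:
--             count_dict[elt] = 1
--
--     # most_frequent = max(count_dict.items(), key = lambda t : t[1])
--     high_frequency = max(count_dict.values())
--     maximi = filter(lambda t : t[1] == high_frequency, count_dict.items())
--     return list(map(lambda t : t[0], maximi))
-- ===== SOURCE B (Python) =====
-- def _get_highest_freq(elts):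
--     counts = {}
--     for elt in elts:
--         counts[elt] = counts.get(elt, 0) + 1
--     groups = {}
--     for elt, c in counts.items():
--         groups.setdefault(c, []).append(elt)
--     return groups[max(groups)]
-- ===== Notes on version B (the rewrite author's own statement) =====
-- stated objective: alternative
-- what changed: Replaces the compute-max-of-values-then-filter-items selection with inverting the count dict into a frequency->elements bucket table and returning the top bucket by a single lookup.
import Mathlib
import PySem

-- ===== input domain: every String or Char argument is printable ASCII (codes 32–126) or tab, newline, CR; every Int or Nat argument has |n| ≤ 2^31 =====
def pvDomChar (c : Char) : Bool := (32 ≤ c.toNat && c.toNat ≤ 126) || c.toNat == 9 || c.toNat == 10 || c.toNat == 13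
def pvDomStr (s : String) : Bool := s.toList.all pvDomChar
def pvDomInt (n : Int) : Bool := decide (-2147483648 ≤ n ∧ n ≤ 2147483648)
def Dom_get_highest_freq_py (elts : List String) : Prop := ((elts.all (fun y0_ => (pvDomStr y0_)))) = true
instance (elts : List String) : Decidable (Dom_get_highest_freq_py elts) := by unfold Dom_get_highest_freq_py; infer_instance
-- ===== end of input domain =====

-- B inverts the frequency table into count -> [elements] buckets and looks up the top bucket,
-- instead of A's max-over-values then filter-items pass (alternative decomposition, same cost).


-- ===== PORT A =====
def get_highest_freq_py (elts : List String) : List String :=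
  let count_dict := elts.foldl (fun d elt =>
    if d.contains elt then d.insert elt (d.getD elt 0 + 1)
    else d.insert elt 1) (PySem.Dict.empty : PySem.Dict String Int)
  match PySem.List.max? count_dict.values (fun v => v) with
  | none => []   -- Python raises ValueError here (empty input); excluded by Pre_
  | some high => (count_dict.items.filter (fun t => t.2 == high)).map (fun t => t.1)

-- ===== PORT B =====
def get_highest_freq_py_alt (elts : List String) : List String :=
  let counts := elts.foldl (fun d elt => d.insert elt (d.getD elt 0 + 1))
    (PySem.Dict.empty : PySem.Dict String Int)
  let groups := counts.items.foldl (fun g p => g.insert p.2 (g.getD p.2 [] ++ [p.1]))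
    (PySem.Dict.empty : PySem.Dict Int (List String))
  match PySem.List.max? groups.keys (fun v => v) with
  | none => []   -- Python raises ValueError here (empty input); excluded by Pre_
  | some high => groups.getD high []

-- ===== PRECONDITION & SPEC =====
-- Pre_ excludes only the empty list, on which Python's max(...) raises ValueError in both A and B.
def Pre_get_highest_freq_py (elts : List String) : Prop := elts ≠ []
instance (elts : List String) : Decidable (Pre_get_highest_freq_py elts) := by unfold Pre_get_highest_freq_py; infer_instance
def pvWitness_get_highest_freq_py : List String := (["a", "b", "a"])
def Spec_get_highest_freq_py (elts : List String) (out : List String) : Prop := out = get_highest_freq_py_alt elts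
instance (elts : List String) (out : List String) : Decidable (Spec_get_highest_freq_py elts out) := by unfold Spec_get_highest_freq_py; infer_instance

-- ===== CLAIM (what is proved, stated in full; the proofs are below) =====
def Claim_equal_get_highest_freq_py : Prop := ∀ (elts : List String), Dom_get_highest_freq_py elts → Pre_get_highest_freq_py elts → Spec_get_highest_freq_py elts (get_highest_freq_py elts)

-- ===== LEMMAS AND PROOFS =====

-- A's counting loop and B's counting loop build the same dict.
theorem count_steps_eq :
    (fun (d : PySem.Dict String Int) elt =>
      if d.contains elt then d.insert elt (d.getD elt 0 + 1) else d.insert elt 1)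
    = (fun (d : PySem.Dict String Int) elt => d.insert elt (d.getD elt 0 + 1)) := by
  funext d elt
  by_cases h : d.contains elt = true
  · simp [h]
  · have hn : d.getD elt 0 = 0 := by
      simp only [Bool.not_eq_true] at h
      simp [PySem.Dict.getD, (PySem.Dict.get?_eq_none_iff_contains d elt).mpr h]
    simp [h, hn]

-- the bucket-building loop: the bucket of c collects, in order, the firsts of pairs whose second is c
theorem groups_getD (ps : List (String × Int)) (g : PySem.Dict Int (List String)) (c : Int) :
    (ps.foldl (fun g p => g.insert p.2 (g.getD p.2 [] ++ [p.1])) g).getD c []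
      = g.getD c [] ++ (ps.filter (fun p => p.2 == c)).map (fun p => p.1) := by
  induction ps generalizing g with
  | nil => simp
  | cons a t ih =>
    simp only [List.foldl_cons, ih, PySem.Dict.getD_insert, List.filter_cons]
    by_cases h : c = a.2
    · simp [h]
    · have h' : (a.2 == c) = false := by simp; omega
      simp [h, h']

theorem groups_keys_mem (ps : List (String × Int)) (g : PySem.Dict Int (List String)) (k : Int) :
    k ∈ ((ps.foldl (fun g p => g.insert p.2 (g.getD p.2 [] ++ [p.1])) g).keys)
      ↔ k ∈ g.keys ∨ k ∈ ps.map (fun p => p.2) := by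
  induction ps generalizing g with
  | nil => simp
  | cons a t ih =>
    simp only [List.foldl_cons, ih, PySem.Dict.mem_keys_insert, List.map_cons, List.mem_cons]
    tauto

-- two Int lists with the same members have the same Python max
theorem max?_congr_mem (l1 l2 : List Int) (h : ∀ x, x ∈ l1 ↔ x ∈ l2) :
    PySem.List.max? l1 (fun v => v) = PySem.List.max? l2 (fun v => v) := by
  cases h1 : PySem.List.max? l1 (fun v => v) with
  | none =>
    have : l1 = [] := (PySem.List.max?_eq_none_iff _ _).mp h1
    subst this
    have h2 : l2 = [] := by
      apply List.eq_nil_iff_forall_not_mem.mpr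
      intro x hx; exact absurd ((h x).mpr hx) (List.not_mem_nil)
    rw [h2]; exact h1.symm
  | some m =>
    cases h2 : PySem.List.max? l2 (fun v => v) with
    | none =>
      have : l2 = [] := (PySem.List.max?_eq_none_iff _ _).mp h2
      subst this
      have := PySem.List.max?_mem h1
      exact absurd ((h m).mp this) (List.not_mem_nil)
    | some m' =>
      have hm1 := PySem.List.max?_mem h1
      have hm2 := PySem.List.max?_mem h2
      have le1 := PySem.List.max?_isMax h1 m' ((h m').mpr hm2)
      have le2 := PySem.List.max?_isMax h2 m ((h m).mp hm1)
      simp only [Option.some_inj]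
      omega

-- ===== VERDICT (by name: the statement is the Claim_ definition above) =====
theorem get_highest_freq_py_spec : Claim_equal_get_highest_freq_py := by
  intro elts _ _
  unfold Spec_get_highest_freq_py get_highest_freq_py get_highest_freq_py_alt
  rw [count_steps_eq]
  dsimp only
  set C := elts.foldl (fun d elt => d.insert elt (d.getD elt 0 + 1))
    (PySem.Dict.empty : PySem.Dict String Int) with hC
  have hmax : PySem.List.max? ((C.items.foldl (fun g p => g.insert p.2 (g.getD p.2 [] ++ [p.1]))
          (PySem.Dict.empty : PySem.Dict Int (List String))).keys) (fun v => v)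
      = PySem.List.max? C.values (fun v => v) := by
    apply max?_congr_mem
    intro x
    rw [groups_keys_mem]
    simp [PySem.Dict.values]
  rw [hmax]
  cases hm : PySem.List.max? C.values (fun v => v) with
  | none => rfl
  | some high =>
    dsimp only
    rw [groups_getD]
    simp
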